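-- pv_equiv track=rewrite | github.com/Pipe1213/VITS_Tutorial | utils/dataset/dataset_creator.py | correct_transcription_errors
-- ===== SOURCE A (Python) =====
-- def correct_transcription_errors(text):
--     """
--     Corrects transcription errors in the text.
--     Replaces '?' with "'" unless '?' is preceded by a space.
--     """
--     corrected_text = ""
--     previous_char = None
--     for char in text:
--         if char == '?' and previous_char != ' ':
--             corrected_text += "'"
--         else:
--             corrected_text += char
--         previous_char = char
--     return corrected_text
-- ===== SOURCE B (Python) =====
-- import re
--
-- def correct_transcription_errors(text):
--     """
--     Corrects transcription errors in the text.
--     Replaces '?' with "'" unless '?' is preceded by a space.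
--     """
--     return re.sub(r"(?<! )\?", "'", text)
-- ===== Notes on version B (the rewrite author's own statement) =====
-- stated objective: idiomatic
-- what changed: Replaced the stateful character loop with string concatenation by a single regex substitution using a negative lookbehind (?<! ) to match every question mark not preceded by a space.
import Mathlib
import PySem

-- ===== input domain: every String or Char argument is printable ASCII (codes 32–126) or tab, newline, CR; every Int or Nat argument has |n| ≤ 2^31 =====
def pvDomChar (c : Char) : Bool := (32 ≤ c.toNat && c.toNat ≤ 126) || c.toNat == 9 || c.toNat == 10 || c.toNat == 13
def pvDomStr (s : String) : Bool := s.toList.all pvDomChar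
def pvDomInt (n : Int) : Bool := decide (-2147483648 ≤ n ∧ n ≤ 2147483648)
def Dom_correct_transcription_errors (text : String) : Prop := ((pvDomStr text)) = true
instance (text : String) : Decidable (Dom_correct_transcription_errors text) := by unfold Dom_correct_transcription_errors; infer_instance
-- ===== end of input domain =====

-- B replaces A's stateful character loop with a single regex-style substitution
-- ("?" not preceded by a space, i.e. a lookbehind on the predecessor character); objective: idiomatic.

-- ===== PORT A =====
-- A: loop over characters with a previous_char state, appending to an accumulator string.
def correct_transcription_errors (text : String) : String :=
  (text.toList.foldl
    (fun (st : String × Option Char) ch =>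
      (if ch = '?' ∧ st.2 ≠ some ' ' then st.1 ++ "'" else st.1.push ch, some ch))
    ("", none)).1

-- ===== PORT B =====
-- B: re.sub(r"(?<! )\?", "'", text); the lookbehind pairs each character with its
-- predecessor (none at string start), replacing '?' whose predecessor is not ' '.
def correct_transcription_errors_alt (text : String) : String :=
  let cs := text.toList
  String.ofList (List.zipWith
    (fun c p => if c = '?' ∧ p ≠ some ' ' then '\'' else c)
    cs (none :: cs.map some))

-- ===== PRECONDITION & SPEC =====
def Spec_correct_transcription_errors (text : String) (out : String) : Prop := out = correct_transcription_errors_alt text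
instance (text : String) (out : String) : Decidable (Spec_correct_transcription_errors text out) := by unfold Spec_correct_transcription_errors; infer_instance

-- ===== CLAIM (what is proved, stated in full; the proofs are below) =====
def Claim_equal_correct_transcription_errors : Prop := ∀ (text : String), Dom_correct_transcription_errors text → Spec_correct_transcription_errors text (correct_transcription_errors text)

-- ===== LEMMAS AND PROOFS =====
theorem cte_loop_toList : ∀ (l : List Char) (acc : String) (prev : Option Char),
    ((l.foldl
      (fun (st : String × Option Char) ch =>
        (if ch = '?' ∧ st.2 ≠ some ' ' then st.1 ++ "'" else st.1.push ch, some ch))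
      (acc, prev)).1).toList
    = acc.toList ++ List.zipWith
        (fun c p => if c = '?' ∧ p ≠ some ' ' then '\'' else c) l (prev :: l.map some) := by
  intro l
  induction l with
  | nil => intro acc prev; simp
  | cons c rest ih =>
    intro acc prev
    simp only [List.foldl_cons, List.map_cons, List.zipWith_cons_cons]
    by_cases h : c = '?' ∧ prev ≠ some ' '
    · simp [h, ih]
    · simp [h, ih, String.toList_push]

-- ===== VERDICT (by name: the statement is the Claim_ definition above) =====
theorem correct_transcription_errors_spec : Claim_equal_correct_transcription_errors := by
  intro text _
  unfold Spec_correct_transcription_errors correct_transcription_errors correct_transcription_errors_alt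
  have h := cte_loop_toList text.toList "" none
  apply String.toList_inj.mp
  simpa [String.toList_ofList] using h
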